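-- pv_equiv track=rewrite | github.com/Whos-Andrei-Go/TTE_R_TO_PYTHON | custom_modules/trialemulation/te_datastore_duckdb.py | translate_to_sql
-- ===== SOURCE A (Python) =====
-- def translate_to_sql(string: str) -> str:
--     """Translate subset_condition to SQL syntax."""
--     replacements = {
--         "|": "OR",
--         "&": "AND",
--         "==": "=",
--         "%in%": "IN",
--         "^c\\(": "("
--     }
--
--     for old, new in replacements.items():
--         string = string.replace(old, new)
--
--     return string
-- ===== SOURCE B (Python) =====
-- def translate_to_sql(string: str) -> str:
--     """Translate subset_condition to SQL syntax in ONE left-to-right pass."""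
--     tokens = [("|", "OR"), ("&", "AND"), ("==", "="), ("%in%", "IN"), ("^c\\(", "(")]
--     out = []
--     i = 0
--     n = len(string)
--     while i < n:
--         for old, new in tokens:
--             if string.startswith(old, i):
--                 out.append(new)
--                 i += len(old)
--                 break
--         else:
--             out.append(string[i])
--             i += 1
--     return "".join(out)
-- ===== Notes on version B (the rewrite author's own statement) =====
-- stated objective: alternative
-- what changed: Replaces the five sequential full-string str.replace passes by a single left-to-right scan that tries each token at the current position and emits its replacement (one pass is equivalent because no replacement text re-creates any search token).
import Mathlib
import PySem

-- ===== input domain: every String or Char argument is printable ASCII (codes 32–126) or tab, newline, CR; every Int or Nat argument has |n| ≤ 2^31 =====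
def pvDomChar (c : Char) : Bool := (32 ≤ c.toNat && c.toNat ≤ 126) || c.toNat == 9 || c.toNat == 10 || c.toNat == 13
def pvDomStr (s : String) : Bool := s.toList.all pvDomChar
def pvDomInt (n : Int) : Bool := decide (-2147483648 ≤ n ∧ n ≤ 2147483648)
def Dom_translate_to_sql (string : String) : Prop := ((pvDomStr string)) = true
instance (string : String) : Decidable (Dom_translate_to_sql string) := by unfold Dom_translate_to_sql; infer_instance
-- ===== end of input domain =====

-- B replaces A's five sequential full-string replace passes by a single left-to-right
-- token scan; objective: alternative (one pass instead of five, same observable result).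


-- ===== PORT A =====
-- A: iterate the replacements dict, doing one full-string replace per entry.
def translate_to_sql (string : String) : String :=
  let replacements : List (String × String) :=
    [("|", "OR"), ("&", "AND"), ("==", "="), ("%in%", "IN"), ("^c\\(", "(")]
  replacements.foldl (fun s p => PySem.Str.replace s p.1 p.2) string

-- ===== PORT B =====
-- B: one left-to-right pass; at each position try the tokens (all with distinct first
-- characters) and emit the replacement, else copy the character.
def scanB : List Char → List Char
  | [] => []
  | '|' :: t => 'O' :: 'R' :: scanB t
  | '&' :: t => 'A' :: 'N' :: 'D' :: scanB t
  | '=' :: '=' :: t => '=' :: scanB t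
  | '%' :: 'i' :: 'n' :: '%' :: t => 'I' :: 'N' :: scanB t
  | '^' :: 'c' :: '\\' :: '(' :: t => '(' :: scanB t
  | c :: t => c :: scanB t

def translate_to_sql_alt (string : String) : String :=
  String.ofList (scanB string.toList)

-- ===== PRECONDITION & SPEC =====
def Spec_translate_to_sql (string : String) (out : String) : Prop := out = translate_to_sql_alt string
instance (string : String) (out : String) : Decidable (Spec_translate_to_sql string out) := by unfold Spec_translate_to_sql; infer_instance

-- ===== CLAIM (what is proved, stated in full; the proofs are below) =====
def Claim_equal_translate_to_sql : Prop := ∀ (string : String), Dom_translate_to_sql string → Spec_translate_to_sql string (translate_to_sql string)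

-- ===== LEMMAS AND PROOFS =====

-- behaviour of PySem.Chars.replace.go: the accumulator factors out
theorem repGo_acc (old new : List Char) (hne : old ≠ []) :
    ∀ (fuel : Nat) (l acc : List Char), l.length ≤ fuel →
      PySem.Chars.replace.go old new fuel l acc
        = acc.reverse ++ PySem.Chars.replace.go old new l.length l [] := by
  have hol : 1 ≤ old.length := List.length_pos_of_ne_nil hne
  intro fuel
  induction fuel using Nat.strong_induction_on with
  | _ fuel ih =>
    intro l acc h
    match fuel, l with
    | 0, l =>
      have : l = [] := List.length_eq_zero_iff.mp (Nat.le_zero.mp h)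
      subst this
      simp [PySem.Chars.replace.go]
    | n+1, [] => simp [PySem.Chars.replace.go]
    | n+1, c :: t =>
      by_cases hp : old.isPrefixOf (c :: t)
      · rw [show PySem.Chars.replace.go old new (n+1) (c :: t) acc
              = PySem.Chars.replace.go old new n ((c :: t).drop old.length) (new.reverse ++ acc) by
            simp [PySem.Chars.replace.go, hp]]
        rw [show PySem.Chars.replace.go old new (c :: t).length (c :: t) []
              = PySem.Chars.replace.go old new t.length ((c :: t).drop old.length) (new.reverse ++ []) by
            simp [PySem.Chars.replace.go, hp]]
        have hlt : n < n + 1 := Nat.lt_succ_self n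
        have hlt2 : t.length < n + 1 := by simp at h; omega
        have hd : ((c :: t).drop old.length).length ≤ n := by simp at h ⊢; omega
        have hd2 : ((c :: t).drop old.length).length ≤ t.length := by simp; omega
        rw [ih n hlt _ _ hd, ih t.length hlt2 _ _ hd2]
        simp
      · rw [show PySem.Chars.replace.go old new (n+1) (c :: t) acc
              = PySem.Chars.replace.go old new n t (c :: acc) by
            simp [PySem.Chars.replace.go, hp]]
        rw [show PySem.Chars.replace.go old new (c :: t).length (c :: t) []
              = PySem.Chars.replace.go old new t.length t [c] by
            simp [PySem.Chars.replace.go, hp]]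
        have hlt : n < n + 1 := Nat.lt_succ_self n
        have hlt2 : t.length < n + 1 := by simp at h; omega
        have ht : t.length ≤ n := by simp at h; omega
        rw [ih n hlt t (c :: acc) ht, ih t.length hlt2 t [c] le_rfl]
        simp

-- structural equations for PySem.Chars.replace with a nonempty pattern
theorem rep_nil (old new : List Char) (h : old ≠ []) :
    PySem.Chars.replace [] old new = [] := by
  cases old with
  | nil => exact absurd rfl h
  | cons o ot => simp [PySem.Chars.replace, PySem.Chars.replace.go]

theorem rep_cons_not_prefix (old new : List Char) (c : Char) (t : List Char)
    (h : old ≠ []) (hp : ¬ old.isPrefixOf (c :: t)) :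
    PySem.Chars.replace (c :: t) old new = c :: PySem.Chars.replace t old new := by
  cases old with
  | nil => exact absurd rfl h
  | cons o ot =>
    simp only [PySem.Chars.replace, List.isEmpty_cons, Bool.false_eq_true, if_false]
    rw [show PySem.Chars.replace.go (o :: ot) new (c :: t).length (c :: t) []
          = PySem.Chars.replace.go (o :: ot) new t.length t [c] by
        simp [PySem.Chars.replace.go, hp]]
    rw [repGo_acc _ _ (by simp) t.length t [c] le_rfl]
    simp

theorem rep_cons_ne (old new : List Char) (c : Char) (t : List Char)
    (h : old.head? ≠ some c) (hne : old ≠ []) :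
    PySem.Chars.replace (c :: t) old new = c :: PySem.Chars.replace t old new := by
  apply rep_cons_not_prefix _ _ _ _ hne
  cases old with
  | nil => exact absurd rfl hne
  | cons o ot =>
    intro hp
    rw [List.isPrefixOf_cons₂] at hp
    simp at h hp
    simp_all

theorem rep_prefix (old new : List Char) (l : List Char)
    (h : old ≠ []) (hp : old.isPrefixOf l) :
    PySem.Chars.replace l old new = new ++ PySem.Chars.replace (l.drop old.length) old new := by
  have hol : 1 ≤ old.length := List.length_pos_of_ne_nil h
  cases old with
  | nil => exact absurd rfl h
  | cons o ot =>
    cases l with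
    | nil => simp [List.isPrefixOf] at hp
    | cons c t =>
      simp only [PySem.Chars.replace, List.isEmpty_cons, Bool.false_eq_true, if_false]
      rw [show PySem.Chars.replace.go (o :: ot) new (c :: t).length (c :: t) []
            = PySem.Chars.replace.go (o :: ot) new t.length ((c :: t).drop (o :: ot).length) ((new.reverse) ++ []) by
          simp [PySem.Chars.replace.go, hp]]
      have hd : ((c :: t).drop (o :: ot).length).length ≤ t.length := by
        simp
      rw [repGo_acc _ _ (by simp) t.length _ _ hd]
      simp

-- head-mismatch helper for rep_cons_ne with an abstract character
theorem headc_ne (o c : Char) (rest : List Char) (h : ¬ c = o) :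
    ((o :: rest) : List Char).head? ≠ some c := by
  simp
  exact fun e => h e.symm

-- abbreviations for A's five passes on the list side
def r1 (l : List Char) : List Char := PySem.Chars.replace l ['|'] ['O', 'R']
def r2 (l : List Char) : List Char := PySem.Chars.replace l ['&'] ['A', 'N', 'D']
def r3 (l : List Char) : List Char := PySem.Chars.replace l ['=', '='] ['=']
def r4 (l : List Char) : List Char := PySem.Chars.replace l ['%', 'i', 'n', '%'] ['I', 'N']
def r5 (l : List Char) : List Char := PySem.Chars.replace l ['^', 'c', '\\', '('] ['(']

-- single-character push-through / firing equations for the five passes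
theorem r1_cons (c : Char) (t : List Char) (h : ¬ c = '|') : r1 (c :: t) = c :: r1 t :=
  rep_cons_ne _ _ _ _ (headc_ne _ _ _ h) (by decide)
theorem r2_cons (c : Char) (t : List Char) (h : ¬ c = '&') : r2 (c :: t) = c :: r2 t :=
  rep_cons_ne _ _ _ _ (headc_ne _ _ _ h) (by decide)
theorem r3_cons (c : Char) (t : List Char) (h : ¬ c = '=') : r3 (c :: t) = c :: r3 t :=
  rep_cons_ne _ _ _ _ (headc_ne _ _ _ h) (by decide)
theorem r4_cons (c : Char) (t : List Char) (h : ¬ c = '%') : r4 (c :: t) = c :: r4 t :=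
  rep_cons_ne _ _ _ _ (headc_ne _ _ _ h) (by decide)
theorem r5_cons (c : Char) (t : List Char) (h : ¬ c = '^') : r5 (c :: t) = c :: r5 t :=
  rep_cons_ne _ _ _ _ (headc_ne _ _ _ h) (by decide)

theorem r1_fire (t : List Char) : r1 ('|' :: t) = 'O' :: 'R' :: r1 t := by
  simpa using rep_prefix ['|'] ['O','R'] ('|' :: t) (by decide) (by simp [List.isPrefixOf])
theorem r2_fire (t : List Char) : r2 ('&' :: t) = 'A' :: 'N' :: 'D' :: r2 t := by
  simpa using rep_prefix ['&'] ['A','N','D'] ('&' :: t) (by decide) (by simp [List.isPrefixOf])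
theorem r3_fire (t : List Char) : r3 ('=' :: '=' :: t) = '=' :: r3 t := by
  simpa using rep_prefix ['=','='] ['='] ('=' :: '=' :: t) (by decide) (by simp [List.isPrefixOf])
theorem r4_fire (t : List Char) : r4 ('%' :: 'i' :: 'n' :: '%' :: t) = 'I' :: 'N' :: r4 t := by
  simpa using rep_prefix ['%','i','n','%'] ['I','N'] ('%' :: 'i' :: 'n' :: '%' :: t) (by decide) (by simp [List.isPrefixOf])
theorem r5_fire (t : List Char) : r5 ('^' :: 'c' :: '\\' :: '(' :: t) = '(' :: r5 t := by
  simpa using rep_prefix ['^','c','\\','('] ['('] ('^' :: 'c' :: '\\' :: '(' :: t) (by decide) (by simp [List.isPrefixOf])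

-- the head of the first three passes' output: '|' becomes 'O', '&' becomes 'A',
-- anything else stays (for '=' both branches of r3 keep '=' in front)
theorem head123 (t : List Char) :
    (r3 (r2 (r1 t))).head? = t.head?.map (fun c => if c = '|' then 'O' else if c = '&' then 'A' else c) := by
  cases t with
  | nil => simp [r1, r2, r3, rep_nil]
  | cons c t =>
    by_cases h1 : c = '|'
    · subst h1
      rw [show r1 ('|' :: t) = 'O' :: 'R' :: r1 t by
            simpa using rep_prefix ['|'] ['O','R'] ('|' :: t) (by simp) (by simp [List.isPrefixOf])]
      rw [show r2 ('O' :: 'R' :: r1 t) = 'O' :: r2 ('R' :: r1 t) from rep_cons_ne _ _ _ _ (by decide) (by decide)]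
      rw [show r3 ('O' :: r2 ('R' :: r1 t)) = 'O' :: r3 (r2 ('R' :: r1 t)) from rep_cons_ne _ _ _ _ (by decide) (by decide)]
      simp
    · rw [show r1 (c :: t) = c :: r1 t from rep_cons_ne _ _ _ _ (headc_ne _ _ _ h1) (by decide)]
      by_cases h2 : c = '&'
      · subst h2
        rw [show r2 ('&' :: r1 t) = 'A' :: 'N' :: 'D' :: r2 (r1 t) by
              simpa using rep_prefix ['&'] ['A','N','D'] ('&' :: r1 t) (by simp) (by simp [List.isPrefixOf])]
        rw [show r3 ('A' :: 'N' :: 'D' :: r2 (r1 t)) = 'A' :: r3 ('N' :: 'D' :: r2 (r1 t)) from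
              rep_cons_ne _ _ _ _ (by decide) (by decide)]
        simp
      · rw [show r2 (c :: r1 t) = c :: r2 (r1 t) from rep_cons_ne _ _ _ _ (headc_ne _ _ _ h2) (by decide)]
        by_cases h3 : c = '='
        · subst h3
          by_cases hp : (['=', '='] : List Char).isPrefixOf ('=' :: r2 (r1 t))
          · rw [show r3 ('=' :: r2 (r1 t))
                  = ['='] ++ PySem.Chars.replace (('=' :: r2 (r1 t)).drop (['=','='] : List Char).length) ['=','='] ['=']
                  from rep_prefix ['=','='] ['='] _ (by decide) hp]  -- r3 fires, output still starts '='
            simp [h1, h2]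
          · rw [show r3 ('=' :: r2 (r1 t)) = '=' :: r3 (r2 (r1 t)) from
                  rep_cons_not_prefix _ _ _ _ (by decide) hp]
            simp [h1, h2]
        · rw [show r3 (c :: r2 (r1 t)) = c :: r3 (r2 (r1 t)) from rep_cons_ne _ _ _ _ (headc_ne _ _ _ h3) (by decide)]
          simp [h1, h2]

-- a prefix starting with a given character pins the head
theorem headOfPrefix (a : Char) (rest w : List Char) (hw : ((a :: rest) : List Char) <+: w) :
    w.head? = some a := by
  cases w with
  | nil => simp at hw
  | cons b bs =>
    rw [List.cons_prefix_cons] at hw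
    simp
    exact hw.1.symm

-- the head of the first two passes' output
theorem head12 (t : List Char) :
    (r2 (r1 t)).head? = t.head?.map (fun c => if c = '|' then 'O' else if c = '&' then 'A' else c) := by
  cases t with
  | nil => simp [r1, r2, rep_nil]
  | cons c t =>
    by_cases hh1 : c = '|'
    · subst hh1
      rw [r1_fire, r2_cons _ _ (by decide)]
      simp
    · rw [r1_cons _ _ hh1]
      by_cases hh2 : c = '&'
      · subst hh2
        rw [r2_fire]
        simp
      · rw [r2_cons _ _ hh2]
        simp [hh1, hh2]

-- r3 passes a leading '=' whose successor is not '='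
theorem r3_skip (u : List Char) (hu : u.head? ≠ some '=') : r3 ('=' :: u) = '=' :: r3 u := by
  apply rep_cons_not_prefix _ _ _ _ (by decide)
  intro hp
  rw [List.isPrefixOf_iff_prefix, List.cons_prefix_cons] at hp
  exact hu (headOfPrefix _ _ _ hp.2)

-- a character other than '|' and '&' and '=' passes untouched through the first three passes
theorem pass123 (c : Char) (t : List Char) (h1 : c ≠ '|') (h2 : c ≠ '&') (h3 : c ≠ '=') :
    r3 (r2 (r1 (c :: t))) = c :: r3 (r2 (r1 t)) := by
  rw [show r1 (c :: t) = c :: r1 t from rep_cons_ne _ _ _ _ (headc_ne _ _ _ h1) (by decide)]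
  rw [show r2 (c :: r1 t) = c :: r2 (r1 t) from rep_cons_ne _ _ _ _ (headc_ne _ _ _ h2) (by decide)]
  exact rep_cons_ne _ _ _ _ (headc_ne _ _ _ h3) (by decide)

-- if the first three passes' output starts with c (not a replacement letter), so did the input
theorem step3 (u : List Char) (c : Char) (h1 : c ≠ '|') (h2 : c ≠ '&') (h3 : c ≠ '=')
    (hO : c ≠ 'O') (hA : c ≠ 'A') (hh : (r3 (r2 (r1 u))).head? = some c) :
    ∃ u', u = c :: u' ∧ r3 (r2 (r1 u)) = c :: r3 (r2 (r1 u')) := by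
  rw [head123 u] at hh
  cases u with
  | nil => simp at hh
  | cons d u' =>
    simp at hh
    split_ifs at hh with hd1 hd2
    · exact absurd hh.symm hO
    · exact absurd hh.symm hA
    · subst hh
      exact ⟨u', rfl, pass123 d u' h1 h2 h3⟩

-- if the first three passes' output starts with "in%", so did the input
theorem prefix_in_123 (t : List Char)
    (h : (['i', 'n', '%'] : List Char) <+: r3 (r2 (r1 t))) :
    (['i', 'n', '%'] : List Char) <+: t := by
  obtain ⟨t1, rfl, he⟩ := step3 t 'i' (by decide) (by decide) (by decide) (by decide) (by decide)
    (headOfPrefix _ _ _ h)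
  rw [he, List.cons_prefix_cons] at h
  obtain ⟨t2, rfl, he2⟩ := step3 t1 'n' (by decide) (by decide) (by decide) (by decide) (by decide)
    (headOfPrefix _ _ _ h.2)
  rw [he2, List.cons_prefix_cons] at h
  obtain ⟨t3, rfl, _⟩ := step3 t2 '%' (by decide) (by decide) (by decide) (by decide) (by decide)
    (headOfPrefix _ _ _ h.2.2)
  exact ⟨t3, rfl⟩

-- same through the fourth pass for heads other than '%' and 'I'
theorem head4_ne (v : List Char) (c : Char) (hc1 : c ≠ '%') (hc2 : c ≠ 'I')
    (h : (r4 v).head? = some c) : v.head? = some c := by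
  cases v with
  | nil => simp [r4, rep_nil] at h
  | cons d vs =>
    by_cases hd : d = '%'
    · subst hd
      by_cases hp : (['%','i','n','%'] : List Char).isPrefixOf ('%' :: vs)
      · rw [show r4 ('%' :: vs) = 'I' :: 'N' :: r4 (('%' :: vs).drop 4) by
              simpa using rep_prefix ['%','i','n','%'] ['I','N'] ('%' :: vs) (by decide) hp] at h
        simp at h; exact absurd h.symm hc2
      · rw [show r4 ('%' :: vs) = '%' :: r4 vs from rep_cons_not_prefix _ _ _ _ (by decide) hp] at h
        simp at h; exact absurd h.symm hc1
    · rw [show r4 (d :: vs) = d :: r4 vs from rep_cons_ne _ _ _ _ (headc_ne _ _ _ hd) (by decide)] at h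
      simpa using h

theorem step4 (u : List Char) (c : Char) (h1 : c ≠ '|') (h2 : c ≠ '&') (h3 : c ≠ '=')
    (h4 : c ≠ '%') (hI : c ≠ 'I') (hO : c ≠ 'O') (hA : c ≠ 'A')
    (hh : (r4 (r3 (r2 (r1 u)))).head? = some c) :
    ∃ u', u = c :: u' ∧ r4 (r3 (r2 (r1 u))) = c :: r4 (r3 (r2 (r1 u'))) := by
  have h3' : (r3 (r2 (r1 u))).head? = some c := head4_ne _ _ h4 hI hh
  obtain ⟨u', rfl, he⟩ := step3 u c h1 h2 h3 hO hA h3'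
  refine ⟨u', rfl, ?_⟩
  rw [he]
  exact rep_cons_ne _ _ _ _ (headc_ne _ _ _ h4) (by decide)

-- if the first four passes' output starts with "c\(", so did the input
theorem prefix_c_1234 (t : List Char)
    (h : (['c', '\\', '('] : List Char) <+: r4 (r3 (r2 (r1 t)))) :
    (['c', '\\', '('] : List Char) <+: t := by
  obtain ⟨t1, rfl, he⟩ := step4 t 'c' (by decide) (by decide) (by decide) (by decide) (by decide)
    (by decide) (by decide) (headOfPrefix _ _ _ h)
  rw [he, List.cons_prefix_cons] at h
  obtain ⟨t2, rfl, he2⟩ := step4 t1 '\\' (by decide) (by decide) (by decide) (by decide) (by decide)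
    (by decide) (by decide) (headOfPrefix _ _ _ h.2)
  rw [he2, List.cons_prefix_cons] at h
  obtain ⟨t3, rfl, _⟩ := step4 t2 '(' (by decide) (by decide) (by decide) (by decide) (by decide)
    (by decide) (by decide) (headOfPrefix _ _ _ h.2.2)
  exact ⟨t3, rfl⟩

-- fall-through equation for scanB
theorem scanB_cons_other (c : Char) (t : List Char)
    (h1 : c ≠ '|') (h2 : c ≠ '&')
    (h3 : ¬ (c = '=' ∧ t.head? = some '='))
    (h4 : ¬ (c = '%' ∧ (['i','n','%'] : List Char) <+: t))
    (h5 : ¬ (c = '^' ∧ (['c','\\','('] : List Char) <+: t)) :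
    scanB (c :: t) = c :: scanB t := by
  rw [scanB.eq_def]
  split
  · simp_all
  · simp_all
  · simp_all
  · rename_i t' heq
    injection heq with e1 e2
    exact absurd ⟨e1, by rw [e2]; rfl⟩ h3
  · rename_i t' heq
    injection heq with e1 e2
    exact absurd ⟨e1, by rw [e2]; exact ⟨_, rfl⟩⟩ h4
  · rename_i t' heq
    injection heq with e1 e2
    exact absurd ⟨e1, by rw [e2]; exact ⟨_, rfl⟩⟩ h5
  · rename_i heq2
    injection heq2 with e1 e2
    rw [e1, e2]

-- the five sequential passes equal the single scan
theorem five_eq_scan : ∀ (n : Nat) (l : List Char), l.length ≤ n →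
    r5 (r4 (r3 (r2 (r1 l)))) = scanB l := by
  intro n
  induction n with
  | zero =>
    intro l h
    have : l = [] := List.length_eq_zero_iff.mp (Nat.le_zero.mp h)
    subst this
    simp [r1, r2, r3, r4, r5, rep_nil, scanB]
  | succ m ih =>
    intro l hlen
    cases l with
    | nil => simp [r1, r2, r3, r4, r5, rep_nil, scanB]
    | cons c t =>
      simp only [List.length_cons] at hlen
      by_cases h1 : c = '|'
      · subst h1
        rw [r1_fire, r2_cons _ _ (by decide), r2_cons _ _ (by decide),
            r3_cons _ _ (by decide), r3_cons _ _ (by decide),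
            r4_cons _ _ (by decide), r4_cons _ _ (by decide),
            r5_cons _ _ (by decide), r5_cons _ _ (by decide), ih t (by omega)]
        rfl
      by_cases h2 : c = '&'
      · subst h2
        rw [r1_cons _ _ (by decide), r2_fire,
            r3_cons _ _ (by decide), r3_cons _ _ (by decide), r3_cons _ _ (by decide),
            r4_cons _ _ (by decide), r4_cons _ _ (by decide), r4_cons _ _ (by decide),
            r5_cons _ _ (by decide), r5_cons _ _ (by decide), r5_cons _ _ (by decide), ih t (by omega)]
        rfl
      by_cases h3 : c = '='
      · subst h3
        cases t with
        | nil => simp [r1, r2, r3, r4, r5, PySem.Chars.replace, PySem.Chars.replace.go, scanB]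
        | cons d t' =>
          by_cases hd : d = '='
          · subst hd
            rw [r1_cons _ _ (by decide), r1_cons _ _ (by decide),
                r2_cons _ _ (by decide), r2_cons _ _ (by decide),
                r3_fire, r4_cons _ _ (by decide), r5_cons _ _ (by decide),
                ih t' (by simp at hlen; omega)]
            rfl
          · rw [r1_cons _ _ (by decide), r2_cons _ _ (by decide)]
            have hu : (r2 (r1 (d :: t'))).head? ≠ some '=' := by
              rw [head12]
              simp
              split_ifs with a b
              · decide
              · decide
              · exact hd
            rw [r3_skip _ hu, r4_cons _ _ (by decide), r5_cons _ _ (by decide),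
                ih (d :: t') (by simp at hlen ⊢; omega)]
            rw [scanB_cons_other '=' (d :: t') (by decide) (by decide) (by simp [hd]) (by simp) (by simp)]
      by_cases h4 : c = '%'
      · subst h4
        by_cases hp : (['i','n','%'] : List Char) <+: t
        · obtain ⟨t3, rfl⟩ : ∃ t3, t = 'i' :: 'n' :: '%' :: t3 := by
            obtain ⟨t3, ht3⟩ := hp
            exact ⟨t3, ht3.symm⟩
          rw [pass123 '%' _ (by decide) (by decide) (by decide), pass123 'i' _ (by decide) (by decide) (by decide),
              pass123 'n' _ (by decide) (by decide) (by decide), pass123 '%' _ (by decide) (by decide) (by decide),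
              r4_fire, r5_cons _ _ (by decide), r5_cons _ _ (by decide),
              ih t3 (by simp at hlen ⊢; omega)]
          rfl
        · rw [pass123 '%' t (by decide) (by decide) (by decide)]
          have hnp : ¬ (['%','i','n','%'] : List Char).isPrefixOf ('%' :: r3 (r2 (r1 t))) := by
            intro hpp
            rw [List.isPrefixOf_iff_prefix, List.cons_prefix_cons] at hpp
            exact hp (prefix_in_123 t hpp.2)
          rw [show r4 ('%' :: r3 (r2 (r1 t))) = '%' :: r4 (r3 (r2 (r1 t))) from
                rep_cons_not_prefix _ _ _ _ (by decide) hnp]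
          rw [r5_cons _ _ (by decide), ih t (by omega)]
          rw [scanB_cons_other '%' t (by decide) (by decide) (by simp) (by simp [hp]) (by simp)]
      by_cases h5 : c = '^'
      · subst h5
        by_cases hp : (['c','\\','('] : List Char) <+: t
        · obtain ⟨t3, rfl⟩ : ∃ t3, t = 'c' :: '\\' :: '(' :: t3 := by
            obtain ⟨t3, ht3⟩ := hp
            exact ⟨t3, ht3.symm⟩
          rw [pass123 '^' _ (by decide) (by decide) (by decide), pass123 'c' _ (by decide) (by decide) (by decide),
              pass123 '\\' _ (by decide) (by decide) (by decide), pass123 '(' _ (by decide) (by decide) (by decide),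
              r4_cons _ _ (by decide), r4_cons _ _ (by decide), r4_cons _ _ (by decide), r4_cons _ _ (by decide),
              r5_fire, ih t3 (by simp at hlen ⊢; omega)]
          rfl
        · rw [pass123 '^' t (by decide) (by decide) (by decide),
              r4_cons _ _ (by decide)]
          have hnp : ¬ (['^','c','\\','('] : List Char).isPrefixOf ('^' :: r4 (r3 (r2 (r1 t)))) := by
            intro hpp
            rw [List.isPrefixOf_iff_prefix, List.cons_prefix_cons] at hpp
            exact hp (prefix_c_1234 t hpp.2)
          rw [show r5 ('^' :: r4 (r3 (r2 (r1 t)))) = '^' :: r5 (r4 (r3 (r2 (r1 t)))) from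
                rep_cons_not_prefix _ _ _ _ (by decide) hnp]
          rw [ih t (by omega)]
          rw [scanB_cons_other '^' t (by decide) (by decide) (by simp) (by simp) (by simp [hp])]
      · rw [pass123 c t h1 h2 h3, r4_cons _ _ h4, r5_cons _ _ h5, ih t (by omega)]
        rw [scanB_cons_other c t h1 h2 (by simp [h3]) (by simp [h4]) (by simp [h5])]

-- ===== VERDICT (by name: the statement is the Claim_ definition above) =====
theorem translate_to_sql_spec : Claim_equal_translate_to_sql := by
  intro string _
  unfold Spec_translate_to_sql translate_to_sql translate_to_sql_alt
  have h := five_eq_scan string.toList.length string.toList le_rfl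
  simp only [r1, r2, r3, r4, r5] at h
  simp [PySem.Str.replace, h]
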